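-- pv_equiv track=rewrite | github.com/lifesaver0129/Basic-DL | Recommendation/ASOS_MyFunction.py | recategorize
-- ===== SOURCE A (Python) =====
-- def del_null_in_list(inputList):
--     output_List = []
--     if inputList is not None:
--         for ele_input_list in inputList:
--             if ele_input_list != '':
--                 output_List.append(ele_input_list)
--     return output_List
--
-- def list_to_string(inputList):
--     outputString = ''
--     if inputList is not None:
--         for ele in inputList:
--             outputString = outputString + str(ele) + ';'
--     return outputString.strip(';')
--
-- def recategorize(productInfoList, keywordList):
--     outputList = []#output list
--     productInfoList = del_null_in_list(productInfoList)#del null elements in list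
--     keywordList = del_null_in_list(keywordList)#del null elements in list
--
--     for ele_productInfoList in productInfoList:#for each row of the productInfo txt file
--         hitlist = []# hit category list
--         ele_productInfoList = ele_productInfoList.strip('\n')#strip the '\n' of each row
--         if '\t' in ele_productInfoList:
--             list_ele_productInfoList = ele_productInfoList.split('\t')#split each row into list with '\t'
--
--             productID = list_ele_productInfoList[0]#this is the productId of each product
--             productContent = list_ele_productInfoList[1].lower()#this is productContent of each product
--             list_productContent = productContent.split(';')#split each product content into a list
--             list_productContent = del_null_in_list(list_productContent)##del null elements in list
--
--             for ele_list_productContent in list_productContent:#for each element in product list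
--                 for ele_keywordList in keywordList:#for each row in the keyword file
--                     ele_keywordList = ele_keywordList.strip('\n')#strip '\n' in each row
--                     ele_keywordList = ele_keywordList.lower()#change each row in to lower character
--                     list_ele_keywordList = ele_keywordList.split(';')#split the keyword string into a string
--                     list_ele_keywordList = del_null_in_list(list_ele_keywordList)##del null elements in list
--
--                     cate = list_ele_keywordList[0]# the first element is the category name of each row
--                     for ele_list_ele_keywordList in list_ele_keywordList:#for each element in each row, if a word in the list
--                         if ele_list_productContent == ele_list_ele_keywordList:
--                             hitlist.append(cate)#store the category name
--             data = [productID, list_to_string(hitlist)]#productID and hitlist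
--             outputList.append(data)#append to the output list
--     return outputList
-- ===== SOURCE B (Python) =====
-- def recategorize(productInfoList, keywordList):
--     # Build once: word -> ordered list of category names (one entry per occurrence
--     # of the word in each keyword row, rows in file order).
--     index = {}
--     if keywordList is not None:
--         for kw_line in keywordList:
--             row = [w for w in kw_line.strip('\n').lower().split(';') if w != '']
--             if row:
--                 cate = row[0]
--                 for w in row:
--                     index.setdefault(w, []).append(cate)
--     outputList = []
--     if productInfoList is not None:
--         for line in productInfoList:
--             line = line.strip('\n')
--             if '\t' in line:
--                 parts = line.split('\t')
--                 hits = []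
--                 for w in parts[1].lower().split(';'):
--                     if w != '':
--                         hits += index.get(w, [])
--                 outputList.append([parts[0], ';'.join(hits)])
--     return outputList
-- ===== Notes on version B (the rewrite author's own statement) =====
-- stated objective: alternative
-- what changed: B builds a word-to-categories dictionary from the keyword file once and then looks each product content word up in it, instead of A's re-parsing and re-scanning of the whole keyword file for every content word of every product; hit strings are produced with ';'.join instead of concatenate-then-strip.
import Mathlib
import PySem

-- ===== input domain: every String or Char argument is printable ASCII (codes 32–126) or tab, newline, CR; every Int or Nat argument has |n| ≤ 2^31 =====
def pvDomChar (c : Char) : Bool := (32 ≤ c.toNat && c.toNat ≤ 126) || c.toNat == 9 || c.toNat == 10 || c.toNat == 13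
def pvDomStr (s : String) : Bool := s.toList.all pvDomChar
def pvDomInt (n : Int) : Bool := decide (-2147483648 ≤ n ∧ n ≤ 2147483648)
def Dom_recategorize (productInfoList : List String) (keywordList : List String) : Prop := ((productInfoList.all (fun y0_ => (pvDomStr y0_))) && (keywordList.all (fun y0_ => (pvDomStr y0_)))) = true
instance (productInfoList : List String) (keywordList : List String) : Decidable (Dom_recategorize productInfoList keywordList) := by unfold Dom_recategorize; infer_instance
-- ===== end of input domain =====

-- B replaces A's per-product-word rescan of the whole keyword file by a word→categories
-- dictionary built once; same return value on all of Pre_ (objective: alternative).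

-- ===== PORT A =====
-- del_null_in_list
def pvDelNull (l : List String) : List String :=
  l.foldl (fun acc e => if e != "" then acc ++ [e] else acc) []

-- list_to_string (str concatenation then strip(';'))
def pvListToString (l : List String) : String :=
  PySem.Str.stripChars (l.foldl (fun s e => s ++ e ++ ";") "") ";"

-- sep is the non-empty literal ";" / "\t" in every call, so split? is always `some`
def pvSplit (s : String) (sep : String) : List String :=
  (PySem.Str.split? s sep).getD []

-- inner body of A's keyword loop, for one product-content word w
def pvInnerKw (w : String) (hitlist : List String) (kl : String) : List String :=
  let krow := pvDelNull (pvSplit (PySem.Str.lower (PySem.Str.stripChars kl "\n")) ";")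
  -- Python's krow[0] raises IndexError iff krow = [] (excluded by Pre_); cate is unused then
  let cate := PySem.List.pyGetD krow 0 ""
  krow.foldl (fun hitlist e => if w = e then hitlist ++ [cate] else hitlist) hitlist

def recategorize (productInfoList : List String) (keywordList : List String) : List (List String) :=
  let productInfoList' := pvDelNull productInfoList
  let keywordList' := pvDelNull keywordList
  productInfoList'.foldl (fun outputList ep =>
    let ep := PySem.Str.stripChars ep "\n"
    if PySem.Str.isIn "\t" ep then
      let parts := pvSplit ep "\t"
      -- parts has ≥ 2 elements whenever '\t' ∈ ep, so Python's parts[0]/parts[1] never raise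
      let productID := PySem.List.pyGetD parts 0 ""
      let productContent := PySem.Str.lower (PySem.List.pyGetD parts 1 "")
      let words := pvDelNull (pvSplit productContent ";")
      let hitlist := words.foldl (fun hitlist w =>
        keywordList'.foldl (pvInnerKw w) hitlist) []
      outputList ++ [[productID, pvListToString hitlist]]
    else outputList) []

-- ===== PORT B =====
-- one keyword row: strip('\n').lower().split(';') with empty words removed
def pvRow (kl : String) : List String :=
  (pvSplit (PySem.Str.lower (PySem.Str.stripChars kl "\n")) ";").filter (fun w => w != "")

-- the word → categories index built once from the keyword file
def pvIndex (keywordList : List String) : PySem.Dict String (List String) :=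
  keywordList.foldl (fun d kl =>
    let row := pvRow kl
    match row with
    | [] => d
    | cate :: _ => row.foldl (fun d w => d.modify w [] (fun cs => cs ++ [cate])) d)
    PySem.Dict.empty

def recategorize_alt (productInfoList : List String) (keywordList : List String) : List (List String) :=
  let index := pvIndex keywordList
  productInfoList.foldl (fun outputList line =>
    let line := PySem.Str.stripChars line "\n"
    if PySem.Str.isIn "\t" line then
      let parts := pvSplit line "\t"
      let hits := (pvSplit (PySem.Str.lower (PySem.List.pyGetD parts 1 "")) ";").foldl
        (fun h w => if w != "" then h ++ index.getD w [] else h) []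
      outputList ++ [[PySem.List.pyGetD parts 0 "", PySem.Str.join ";" hits]]
    else outputList) []

-- ===== PRECONDITION & SPEC =====
-- Pre_ excludes exactly the inputs where Python A raises IndexError: some product row has a
-- non-empty content word AND some non-empty keyword line reduces to an empty list (only ';'
-- characters after stripping '\n'), so `cate = list_ele_keywordList[0]` fails.
def Pre_recategorize (productInfoList : List String) (keywordList : List String) : Prop :=
  (productInfoList.any (fun p => PySem.Str.isIn "\t" (PySem.Str.stripChars p "\n") &&
      (PySem.List.pyGetD ((PySem.Str.split? (PySem.Str.stripChars p "\n") "\t").getD []) 1 "").toList.any (fun c => c != ';')) = true) →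
  keywordList.all (fun kl => kl == "" || (PySem.Str.stripChars kl "\n").toList.any (fun c => c != ';')) = true
instance (productInfoList : List String) (keywordList : List String) : Decidable (Pre_recategorize productInfoList keywordList) := by unfold Pre_recategorize; infer_instance

def pvWitness_recategorize : List String × List String :=
  (["1\tshoe;red", "2\that"], ["footwear;shoe;boot", "headgear;hat;shoe"])

def Spec_recategorize (productInfoList : List String) (keywordList : List String) (out : List (List String)) : Prop := out = recategorize_alt productInfoList keywordList
instance (productInfoList : List String) (keywordList : List String) (out : List (List String)) : Decidable (Spec_recategorize productInfoList keywordList out) := by unfold Spec_recategorize; infer_instance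

-- ===== CLAIM (what is proved, stated in full; the proofs are below) =====
def Claim_equal_recategorize : Prop := ∀ (productInfoList : List String) (keywordList : List String), Dom_recategorize productInfoList keywordList → Pre_recategorize productInfoList keywordList → Spec_recategorize productInfoList keywordList (recategorize productInfoList keywordList)


-- ===== LEMMAS AND PROOFS =====

-- proof-side bookkeeping: the (word, category) pairs contributed by one keyword line / the whole file
def pvRowPairs (kl : String) : List (String × String) :=
  match pvRow kl with
  | [] => []
  | cate :: _ => (pvRow kl).map (fun w => (w, cate))

def pvPairs (keywordList : List String) : List (String × String) :=
  keywordList.flatMap pvRowPairs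

-- the ordered category list one content word w collects
def pvCats (keywordList : List String) (w : String) : List String :=
  ((pvPairs keywordList).filter (fun p => p.1 == w)).map (fun p => p.2)

theorem pvDelNull_eq_filter (l : List String) :
    pvDelNull l = l.filter (fun e => e != "") := by
  simpa only [List.map_id, List.nil_append]
    using PySem.List.foldl_append_if (fun e => e != "") id l []

theorem pvSplitOn_go_no_sep (c : Char) (fuel : Nat) :
    ∀ (l cur : List Char) (acc : List (List Char)),
    l.length < fuel →
    (∀ p ∈ acc, c ∉ p) → c ∉ cur →
    ∀ p ∈ PySem.Chars.splitOn.go [c] fuel l cur acc, c ∉ p := by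
  induction fuel with
  | zero => intro l cur acc h; omega
  | succ n ih =>
    intro l cur acc hlen hacc hcur
    match l with
    | [] =>
      unfold PySem.Chars.splitOn.go
      simp only [List.mem_reverse, List.mem_cons]
      intro p hp
      rcases hp with h | h
      · subst h; simpa using hcur
      · exact hacc p h
    | a :: rest =>
      unfold PySem.Chars.splitOn.go
      by_cases hpre : [c].isPrefixOf (a :: rest) = true
      · simp only [hpre, if_true]
        have hco : c = a := by simpa [List.isPrefixOf] using hpre
        intro p hp
        refine ih _ _ _ ?_ ?_ (List.not_mem_nil) p
          (by rw [show List.drop [c].length (a :: rest) = rest from rfl] at hp; exact hp)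
        · simp at hlen ⊢; omega
        · intro q hq
          rcases List.mem_cons.mp hq with h | h
          · subst h; simpa using hcur
          · exact hacc q h
      · simp only [hpre]
        intro p hp
        have hac : a ≠ c := by
          intro h; exact hpre (by simp [List.isPrefixOf, h])
        refine ih _ _ _ ?_ hacc ?_ p hp
        · simp at hlen ⊢; omega
        · intro h; rcases List.mem_cons.mp h with h | h
          · exact hac h.symm
          · exact hcur h

theorem pvSplitOn_no_sep (c : Char) (s : List Char) :
    ∀ p ∈ PySem.Chars.splitOn s [c], c ∉ p := by
  intro p hp
  exact pvSplitOn_go_no_sep c (s.length + 1) s [] [] (by omega) (by simp) (by simp) p hp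

theorem pvSplit_semi_no_semi (s part : String) (h : part ∈ pvSplit s ";") :
    ';' ∉ part.toList := by
  have hm := PySem.Str.split?_map s ";"
  rw [show (";" : String).toList = [';'] from rfl, PySem.Chars.split?] at hm
  cases hsp : PySem.Str.split? s ";" with
  | none => rw [hsp] at hm; simp at hm
  | some L =>
    rw [hsp] at hm
    simp at hm
    unfold pvSplit at h; rw [hsp] at h
    simp only [Option.getD_some] at h
    have hmem : part.toList ∈ PySem.Chars.splitOn s.toList [';'] := by
      rw [← hm]; exact List.mem_map_of_mem h
    exact pvSplitOn_no_sep ';' s.toList part.toList hmem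

-- elements of a processed keyword row are non-empty and ';'-free
theorem pvRow_good (kl : String) : ∀ e ∈ pvRow kl, e ≠ "" ∧ ';' ∉ e.toList := by
  intro e he
  unfold pvRow at he
  have h1 := List.of_mem_filter he
  have h2 := List.mem_of_mem_filter he
  exact ⟨by simpa using h1, pvSplit_semi_no_semi _ e h2⟩

theorem pvPairs_good (K : List String) : ∀ x ∈ pvPairs K, x.2 ≠ "" ∧ ';' ∉ x.2.toList := by
  intro x hx
  unfold pvPairs at hx
  obtain ⟨kl, _, hx⟩ := List.mem_flatMap.mp hx
  unfold pvRowPairs at hx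
  cases hrow : pvRow kl with
  | nil => rw [hrow] at hx; simp at hx
  | cons cate rest =>
    rw [hrow] at hx
    obtain ⟨w, _, hw⟩ := List.mem_map.mp hx
    have : x.2 = cate := by rw [← hw]
    rw [this]
    exact pvRow_good kl cate (hrow ▸ List.mem_cons_self)

-- ===== the word → category-list index =====

theorem pvIndexStep_eq (d : PySem.Dict String (List String)) (kl : String) :
    (let row := pvRow kl
     match row with
     | [] => d
     | cate :: _ => row.foldl (fun d w => d.modify w [] (fun cs => cs ++ [cate])) d)
    = (pvRowPairs kl).foldl (fun d p => d.modify p.1 [] (fun cs => cs ++ [p.2])) d := by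
  unfold pvRowPairs
  cases hrow : pvRow kl with
  | nil => rfl
  | cons cate rest => simp only [List.foldl_map]

theorem pvIndex_eq (K : List String) :
    pvIndex K = (pvPairs K).foldl (fun d p => d.modify p.1 [] (fun cs => cs ++ [p.2])) PySem.Dict.empty := by
  unfold pvIndex pvPairs
  rw [List.foldl_flatMap]
  have h : (fun (d : PySem.Dict String (List String)) kl =>
      (let row := pvRow kl
       match row with
       | [] => d
       | cate :: _ => row.foldl (fun d w => d.modify w [] (fun cs => cs ++ [cate])) d))
      = fun d kl => (pvRowPairs kl).foldl (fun d p => d.modify p.1 [] (fun cs => cs ++ [p.2])) d :=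
    funext fun d => funext fun kl => pvIndexStep_eq d kl
  rw [h]

theorem pvIndex_getD (K : List String) (w : String) :
    (pvIndex K).getD w [] = pvCats K w := by
  rw [pvIndex_eq, PySem.Dict.getD_foldl_modify_append]
  unfold pvCats
  simp [PySem.Dict.getD, PySem.Dict.empty, PySem.Dict.get?]

-- ===== A's keyword scan, per content word =====

theorem pvInnerRow_eq (w cate : String) (row : List String) :
    ∀ h0, row.foldl (fun h e => if w = e then h ++ [cate] else h) h0
      = h0 ++ ((row.map (fun x => (x, cate))).filter (fun p => p.1 == w)).map (fun p => p.2) := by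
  induction row with
  | nil => intro h0; simp
  | cons a t ih =>
    intro h0
    by_cases hw : w = a
    · subst hw
      simp only [List.foldl_cons]
      rw [ih]
      simp [List.append_assoc]
    · simp only [List.foldl_cons, if_neg hw]
      rw [ih]
      have hba : (a == w) = false := by simpa using fun h => hw h.symm
      simp [hba]

theorem pvKrow_eq (kl : String) :
    pvDelNull (pvSplit (PySem.Str.lower (PySem.Str.stripChars kl "\n")) ";") = pvRow kl := by
  rw [pvDelNull_eq_filter]; rfl

theorem pvInnerKw_eq (w : String) (h0 : List String) (kl : String) :
    pvInnerKw w h0 kl = h0 ++ ((pvRowPairs kl).filter (fun p => p.1 == w)).map (fun p => p.2) := by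
  simp only [pvInnerKw, pvKrow_eq]
  unfold pvRowPairs
  cases hrow : pvRow kl with
  | nil => simp
  | cons cate rest =>
    simp only [List.getD_cons_zero, PySem.List.pyGetD_ofNat']
    rw [pvInnerRow_eq]

theorem pvKwScan_eq (K : List String) (w : String) :
    ∀ h0, (pvDelNull K).foldl (pvInnerKw w) h0 = h0 ++ pvCats K w := by
  rw [pvDelNull_eq_filter]
  induction K with
  | nil => intro h0; simp [pvCats, pvPairs]
  | cons kl Kt ih =>
    intro h0
    have hsplit : pvCats (kl :: Kt) w
        = ((pvRowPairs kl).filter (fun p => p.1 == w)).map (fun p => p.2) ++ pvCats Kt w := by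
      unfold pvCats pvPairs
      rw [List.flatMap_cons, List.filter_append, List.map_append]
    by_cases hkl : kl = ""
    · subst hkl
      have hrow : pvRowPairs "" = [] := by decide
      rw [hsplit, hrow]
      simpa using ih h0
    · have hne : (kl != "") = true := by simpa using hkl
      simp only [List.filter_cons, hne, if_true, List.foldl_cons]
      rw [hsplit]
      rw [pvInnerKw_eq, ih, List.append_assoc]

-- ===== the hit list, both ways =====

theorem pvHitA_eq (K : List String) (words : List String) :
    words.foldl (fun hitlist w => (pvDelNull K).foldl (pvInnerKw w) hitlist) []
      = words.flatMap (pvCats K) := by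
  simp only [pvKwScan_eq]
  simpa using PySem.List.foldl_append_eq_flatMap (pvCats K) words []

theorem pvHitB_eq (K : List String) (splitlist : List String) :
    splitlist.foldl (fun h w => if w != "" then h ++ (pvIndex K).getD w [] else h) []
      = (splitlist.filter (fun w => w != "")).flatMap (pvCats K) := by
  simp only [pvIndex_getD]
  rw [← List.foldl_filter]
  simpa using PySem.List.foldl_append_eq_flatMap (pvCats K) (splitlist.filter (fun w => w != "")) []

theorem pvHit_good (K : List String) (words : List String) :
    ∀ e ∈ words.flatMap (pvCats K), e ≠ "" ∧ ';' ∉ e.toList := by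
  intro e he
  obtain ⟨w, _, he⟩ := List.mem_flatMap.mp he
  unfold pvCats at he
  obtain ⟨p, hp, hpe⟩ := List.mem_map.mp he
  have := pvPairs_good K p (List.mem_of_mem_filter hp)
  rw [← hpe]; exact this

-- ===== list_to_string(hits) = ';'.join(hits) for non-empty ';'-free parts =====

theorem pvConcat_eq (l : List (List Char)) (hne : l ≠ []) :
    ∀ c0, l.foldl (fun cs e => cs ++ e ++ [';']) c0 = c0 ++ PySem.Chars.join [';'] l ++ [';'] := by
  induction l with
  | nil => exact absurd rfl hne
  | cons p rest ih =>
    intro c0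
    rw [List.foldl_cons]
    cases hrest : rest with
    | nil => subst hrest; simp [PySem.Chars.join_singleton]
    | cons q rt =>
      subst hrest
      rw [ih (by simp) (c0 ++ p ++ [';']), PySem.Chars.join_cons_cons]
      simp

theorem pvJoin_rev_head (l : List (List Char)) (hgood : ∀ p ∈ l, p ≠ [] ∧ ';' ∉ p) (hne : l ≠ []) :
    ∃ a u, (PySem.Chars.join [';'] l).reverse = a :: u ∧ ¬ a = ';' := by
  induction l with
  | nil => exact absurd rfl hne
  | cons p rest ih =>
    cases hrest : rest with
    | nil =>
      obtain ⟨hp, hsemi⟩ := hgood p List.mem_cons_self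
      rw [PySem.Chars.join_singleton]
      cases hr : p.reverse with
      | nil => exact absurd (by simpa using hr) hp
      | cons a u =>
        have ha : a ∈ p := by
          have : a ∈ p.reverse := by rw [hr]; exact List.mem_cons_self
          exact List.mem_reverse.mp this
        exact ⟨a, u, rfl, fun h => hsemi (by rw [← h]; exact ha)⟩
    | cons q rt =>
      obtain ⟨a, u, hrev, ha⟩ := ih (fun x hx => hgood x (List.mem_cons_of_mem p hx)) (by simp [hrest])
      subst hrest
      rw [PySem.Chars.join_cons_cons]
      refine ⟨a, u ++ [';'] ++ p.reverse, ?_, ha⟩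
      rw [List.reverse_append, List.reverse_append, hrev]
      simp

theorem pvStrip_concat (l : List (List Char)) (hgood : ∀ p ∈ l, p ≠ [] ∧ ';' ∉ p) :
    PySem.Chars.stripChars (l.foldl (fun cs e => cs ++ e ++ [';']) []) [';']
      = PySem.Chars.join [';'] l := by
  cases l with
  | nil => decide
  | cons p rest =>
    rw [pvConcat_eq _ (by simp)]
    simp only [List.nil_append]
    obtain ⟨hp, hsemi⟩ := hgood p List.mem_cons_self
    have hhead : ∃ a t u, PySem.Chars.join [';'] (p :: rest) = a :: t ∧ p = a :: u := by
      cases hp' : p with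
      | nil => exact absurd hp' hp
      | cons a u =>
        cases rest with
        | nil => exact ⟨a, u, u, by rw [PySem.Chars.join_singleton], rfl⟩
        | cons q rt =>
          refine ⟨a, u ++ [';'] ++ PySem.Chars.join [';'] (q :: rt), u, ?_, rfl⟩
          simp [PySem.Chars.join_cons_cons]
    obtain ⟨a, t, u, hj, hpau⟩ := hhead
    have ha : a ∈ p := hpau ▸ List.mem_cons_self
    have hane : a ≠ ';' := fun h => hsemi (by rw [← h]; exact ha)
    obtain ⟨b, v, hrev, hb⟩ := pvJoin_rev_head (p :: rest) hgood (by simp)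
    rw [hj] at hrev ⊢
    simp only [PySem.Chars.stripChars]
    rw [show (a :: t) ++ [';'] = a :: (t ++ [';']) from rfl]
    rw [show List.dropWhile (fun c => [';'].contains c) (a :: (t ++ [';'])) = a :: (t ++ [';'])
      from by rw [List.dropWhile_cons]; simp [hane]]
    rw [show (a :: (t ++ [';'])).reverse = ';' :: (a :: t).reverse from by
      rw [← List.cons_append, List.reverse_append]; rfl]
    rw [show List.dropWhile (fun c => [';'].contains c) (';' :: (a :: t).reverse)
        = List.dropWhile (fun c => [';'].contains c) ((a :: t).reverse) from by
      rw [List.dropWhile_cons]; simp]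
    rw [hrev]
    rw [show List.dropWhile (fun c => [';'].contains c) (b :: v) = b :: v from by
      rw [List.dropWhile_cons]; simp [hb]]
    rw [← hrev, List.reverse_reverse]

theorem pvFoldStr_toList (l : List String) :
    ∀ s0 : String, (l.foldl (fun s e => s ++ e ++ ";") s0).toList
      = (l.map String.toList).foldl (fun cs e => cs ++ e ++ [';']) s0.toList := by
  induction l with
  | nil => intro s0; rfl
  | cons e t ih =>
    intro s0
    rw [List.foldl_cons, ih, List.map_cons, List.foldl_cons,
      String.toList_append, String.toList_append]
    rfl

theorem pvListToString_eq_join (l : List String) (hgood : ∀ e ∈ l, e ≠ "" ∧ ';' ∉ e.toList) :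
    pvListToString l = PySem.Str.join ";" l := by
  rw [← String.toList_inj]
  unfold pvListToString
  rw [PySem.Str.toList_stripChars, PySem.Str.toList_join, pvFoldStr_toList]
  rw [show ("" : String).toList = [] from rfl, show (";" : String).toList = [';'] from rfl]
  apply pvStrip_concat
  intro p hp
  obtain ⟨e, he, hpe⟩ := List.mem_map.mp hp
  obtain ⟨h1, h2⟩ := hgood e he
  subst hpe
  exact ⟨by simpa [← String.toList_eq_nil_iff] using h1, h2⟩

-- ===== the per-product bodies agree; fold over the product file =====

set_option maxHeartbeats 1000000 in
theorem main_eq (P K : List String) : recategorize P K = recategorize_alt P K := by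
  simp only [recategorize, recategorize_alt]
  rw [pvDelNull_eq_filter P, List.foldl_filter]
  congr 1
  funext out line
  by_cases hline : line = ""
  · subst hline
    rw [show (("" : String) != "") = false from rfl]
    rw [show PySem.Str.isIn "\t" (PySem.Str.stripChars "" "\n") = false from rfl]
    simp
  · have hne : (line != "") = true := by simpa using hline
    rw [hne]
    simp only [if_true]
    by_cases htab : PySem.Str.isIn "\t" (PySem.Str.stripChars line "\n") = true
    · rw [htab]
      simp only [if_true]
      rw [pvHitA_eq, pvHitB_eq, ← pvDelNull_eq_filter,
        pvListToString_eq_join _ (pvHit_good K _)]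
    · rw [Bool.not_eq_true] at htab
      rw [htab]
      simp

-- ===== VERDICT (by name: the statement is the Claim_ definition above) =====
theorem recategorize_spec : Claim_equal_recategorize := by
  intro P K _ _
  unfold Spec_recategorize
  exact main_eq P K
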